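-- pv_equiv track=rewrite | github.com/tkddls23/BaekJoon | haeram/python/pg_132267.py | solution
-- ===== SOURCE A (Python) =====
-- def solution(a, b, n):
--     rest = n
--     ans = 0
--
--     while (rest>=a):
--         add_new = rest//a
--         ans += (add_new)*b
--         rest -= (add_new*a)
--         rest += (add_new)*b
--
--     return ans
-- ===== SOURCE B (Python) =====
-- def solution(a, b, n):
--     # Closed form: each exchange nets (a-b) caps away; total exchanges = (n-a)//(a-b)+1 when n>=a.
--     if n < a:
--         return 0
--     return b * ((n - a) // (a - b) + 1)
-- ===== Notes on version B (the rewrite author's own statement) =====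
-- stated objective: simpler
-- what changed: Replaces the repeated-exchange while loop with the closed form b*((n-a)//(a-b)+1) for n>=a (else 0).
-- outside the precondition, e.g. on solution(5, -3, 12): A returns -6, B returns -3; on solution(-2, 1, 5): A returns -3, B returns -2; on solution(0, 1, 0): A raises ZeroDivisionError, B returns 1
import Mathlib
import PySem

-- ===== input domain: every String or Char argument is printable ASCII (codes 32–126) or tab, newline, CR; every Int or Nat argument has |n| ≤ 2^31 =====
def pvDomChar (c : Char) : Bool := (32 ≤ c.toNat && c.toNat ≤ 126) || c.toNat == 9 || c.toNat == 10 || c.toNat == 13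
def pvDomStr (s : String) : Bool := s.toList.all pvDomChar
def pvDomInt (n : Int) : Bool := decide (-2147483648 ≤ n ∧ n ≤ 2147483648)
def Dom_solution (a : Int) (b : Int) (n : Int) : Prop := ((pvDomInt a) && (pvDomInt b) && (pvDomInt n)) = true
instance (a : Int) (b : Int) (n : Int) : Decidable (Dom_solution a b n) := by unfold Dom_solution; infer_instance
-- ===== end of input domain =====

-- B replaces A's repeated-exchange while loop by the closed form b*((n-a)//(a-b)+1) for n ≥ a, else 0.

-- ===== PORT A =====
-- the while loop, with a fuel argument only to make it total (under Pre_ the fuel always suffices)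
def solutionLoop (a : Int) (b : Int) : Nat → Int → Int → Int
  | 0, _, ans => ans
  | fuel+1, rest, ans =>
    if a ≤ rest then
      let add_new := PySem.Int.floordiv rest a
      solutionLoop a b fuel (rest - add_new * a + add_new * b) (ans + add_new * b)
    else ans

def solution (a : Int) (b : Int) (n : Int) : Int :=
  solutionLoop a b (n.toNat + a.natAbs + b.natAbs + 2) n 0

-- ===== PORT B =====
def solution_alt (a : Int) (b : Int) (n : Int) : Int :=
  if n < a then 0
  else b * (PySem.Int.floordiv (n - a) (a - b) + 1)

-- ===== PRECONDITION & SPEC =====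
-- Pre_ admits the natural exchange domain (a caps buy 0 ≤ b < a new caps) plus every input with
-- n < a, where the loop never runs; it excludes only n ≥ a with a ≤ 0, b ≥ a or b < 0 — there the
-- Python A diverges, raises ZeroDivisionError, or (for nonsensical negative rates) terminates with
-- accidental values of its batching that no specification would choose.
def Pre_solution (a : Int) (b : Int) (n : Int) : Prop := (0 < a ∧ 0 ≤ b ∧ b < a) ∨ n < a
instance (a : Int) (b : Int) (n : Int) : Decidable (Pre_solution a b n) := by unfold Pre_solution; infer_instance

def pvWitness_solution : Int × Int × Int := (3, 1, 20)

def Spec_solution (a : Int) (b : Int) (n : Int) (out : Int) : Prop := out = solution_alt a b n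
instance (a : Int) (b : Int) (n : Int) (out : Int) : Decidable (Spec_solution a b n out) := by unfold Spec_solution; infer_instance

-- ===== CLAIM (what is proved, stated in full; the proofs are below) =====
def Claim_equal_solution : Prop := ∀ (a : Int) (b : Int) (n : Int), Dom_solution a b n → Pre_solution a b n → Spec_solution a b n (solution a b n)

-- ===== LEMMAS AND PROOFS =====

-- closed form of the remaining loop, as a function of rest
def loopVal (a b rest : Int) : Int :=
  if a ≤ rest then b * (PySem.Int.floordiv (rest - a) (a - b) + 1) else 0

theorem solutionLoop_stop (a b : Int) (fuel : Nat) (rest ans : Int) (h : ¬ a ≤ rest) :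
    solutionLoop a b fuel rest ans = ans := by
  cases fuel with
  | zero => rfl
  | succ f => simp only [solutionLoop, if_neg h]

theorem solutionLoop_eq (a b : Int) (ha : 0 < a) (hb : 0 ≤ b) (hba : b < a) :
    ∀ (fuel : Nat) (rest ans : Int), rest < a + fuel →
      solutionLoop a b fuel rest ans = ans + loopVal a b rest := by
  intro fuel
  induction fuel with
  | zero =>
    intro rest ans h
    simp only [solutionLoop, loopVal]
    rw [if_neg (by omega)]
    omega
  | succ f ih =>
    intro rest ans h
    by_cases hr : a ≤ rest
    · have hd : (0:Int) < a - b := by omega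
      set m := PySem.Int.floordiv rest a with hm
      have hm1 : 1 ≤ m := by
        rw [hm, PySem.Int.le_floordiv_iff_mul_le ha]; omega
      have hml : m * a ≤ rest := by
        have := (PySem.Int.le_floordiv_iff_mul_le ha (q := m) (a := rest)).mp (le_of_eq hm.symm)
        exact this
      have hmu : rest < (m + 1) * a := by
        have := (PySem.Int.floordiv_lt_iff_lt_mul ha (q := m + 1) (a := rest)).mp (by omega)
        exact this
      have hrest' : rest - m * a + m * b = rest - m * (a - b) := by ring
      have hdec : 1 ≤ m * (a - b) := by nlinarith
      simp only [solutionLoop, if_pos hr, ← hm]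
      rw [ih (rest - m * a + m * b) (ans + m * b) (by omega)]
      -- remains: ans + m*b + loopVal rest' = ans + loopVal rest
      have key : loopVal a b rest = m * b + loopVal a b (rest - m * a + m * b) := by
        unfold loopVal
        rw [if_pos hr, hrest']
        by_cases hr' : a ≤ rest - m * (a - b)
        · rw [if_pos hr']
          have : rest - a = (rest - m * (a - b) - a) + m * (a - b) := by ring
          rw [this, PySem.Int.floordiv_eq_ediv_of_pos hd,
              PySem.Int.floordiv_eq_ediv_of_pos hd,
              Int.add_mul_ediv_right _ _ (by omega : a - b ≠ 0)]
          ring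
        · rw [if_neg hr']
          have hfd : PySem.Int.floordiv (rest - a) (a - b) = m - 1 := by
            rw [PySem.Int.floordiv_eq_iff_of_pos hd]
            constructor
            · nlinarith
            · have : (m - 1 + 1) * (a - b) = m * (a - b) := by ring
              rw [this]; omega
          rw [hfd]; ring
      rw [key]; ring
    · simp only [solutionLoop, if_neg hr, loopVal]
      omega

-- ===== VERDICT (by name: the statement is the Claim_ definition above) =====
theorem solution_spec : Claim_equal_solution := by
  intro a b n _ hpre
  by_cases hna : n < a
  · show solution a b n = solution_alt a b n
    unfold solution solution_alt
    rw [if_pos hna, solutionLoop_stop a b _ n 0 (by omega)]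
  obtain ⟨ha, hb, hba⟩ := hpre.resolve_right hna
  unfold Spec_solution solution solution_alt
  rw [solutionLoop_eq a b ha hb hba _ n 0 (by omega)]
  unfold loopVal
  by_cases hn : n < a
  · rw [if_neg (by omega), if_pos hn]; ring
  · rw [if_pos (by omega), if_neg hn]; ring
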